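-- pv_equiv track=rewrite | github.com/bcyISthebest/isl-speech-translator-learning-portal | app.py | sentence_reordering
-- ===== SOURCE A (Python) =====
-- def sentence_reordering(ud_sents):
--
--     reordered_sent_list = []
--
--     for sent in ud_sents:
--
--         reordered_sent = []
--         verbs = []
--
--         for tup in sent:
--
--             if tup[1] == 'VERB':
--                 verbs.append(tup)
--             else:
--                 reordered_sent.append(tup)
--
--         reordered_sent = reordered_sent + verbs
--
--         reordered_sent_list.append(reordered_sent)
--
--     return reordered_sent_list
-- ===== SOURCE B (Python) =====
-- def sentence_reordering(ud_sents):
--     # Stable sort on a boolean key: non-VERB tokens (False) keep their order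
--     # and precede VERB tokens (True), which also keep theirs.
--     return [sorted(sent, key=lambda tup: tup[1] == 'VERB') for sent in ud_sents]
-- ===== Notes on version B (the rewrite author's own statement) =====
-- stated objective: idiomatic
-- what changed: Replaces the explicit two-bucket partition loop (non-verb list + verb list, concatenated) with a single stable sort per sentence keyed on the boolean 'is VERB', relying on sort stability for the within-group order.
import Mathlib
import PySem

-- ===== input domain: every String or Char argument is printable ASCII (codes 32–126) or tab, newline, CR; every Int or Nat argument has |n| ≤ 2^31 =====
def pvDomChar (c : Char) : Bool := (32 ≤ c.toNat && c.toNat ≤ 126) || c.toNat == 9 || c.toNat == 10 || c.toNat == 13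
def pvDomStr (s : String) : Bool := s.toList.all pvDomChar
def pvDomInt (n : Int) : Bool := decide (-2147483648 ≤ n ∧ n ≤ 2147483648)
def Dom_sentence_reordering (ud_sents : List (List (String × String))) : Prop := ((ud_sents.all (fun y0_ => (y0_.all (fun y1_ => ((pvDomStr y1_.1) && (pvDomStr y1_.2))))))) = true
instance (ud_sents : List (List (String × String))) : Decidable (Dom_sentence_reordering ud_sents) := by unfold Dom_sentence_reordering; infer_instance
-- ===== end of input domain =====

-- B moves VERB tokens to the end of each sentence by one stable sort on the
-- boolean key 'POS == VERB' instead of A's explicit two-bucket partition loop;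
-- same return value, no mutation (objective: idiomatic).

-- ===== PORT A =====
-- inner loop of A: accumulate (reordered_sent, verbs) over the sentence
def sentence_reordering_inner (sent : List (String × String)) : List (String × String) :=
  let p := sent.foldl
    (fun (acc : List (String × String) × List (String × String)) tup =>
      if tup.2 == "VERB" then (acc.1, acc.2 ++ [tup]) else (acc.1 ++ [tup], acc.2))
    ([], [])
  p.1 ++ p.2

def sentence_reordering (ud_sents : List (List (String × String))) : List (List (String × String)) :=
  ud_sents.foldl (fun acc sent => acc ++ [sentence_reordering_inner sent]) []

-- ===== PORT B =====
def sentence_reordering_alt (ud_sents : List (List (String × String))) : List (List (String × String)) :=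
  ud_sents.map (fun sent => PySem.List.sorted sent (fun tup => tup.2 == "VERB") false)

-- ===== PRECONDITION & SPEC =====
def Spec_sentence_reordering (ud_sents : List (List (String × String))) (out : List (List (String × String))) : Prop := out = sentence_reordering_alt ud_sents
instance (ud_sents : List (List (String × String))) (out : List (List (String × String))) : Decidable (Spec_sentence_reordering ud_sents out) := by unfold Spec_sentence_reordering; infer_instance

-- ===== CLAIM (what is proved, stated in full; the proofs are below) =====
def Claim_equal_sentence_reordering : Prop := ∀ (ud_sents : List (List (String × String))), Dom_sentence_reordering ud_sents → Spec_sentence_reordering ud_sents (sentence_reordering ud_sents)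

-- ===== LEMMAS AND PROOFS =====

-- inserting an element whose key is maximal (never 'before' anything) appends it
theorem insertBy_all_false {α : Type} (before : α → α → Bool) (x : α) (l : List α)
    (h : ∀ y ∈ l, before x y = false) :
    PySem.List.insertBy before x l = l ++ [x] := by
  induction l with
  | nil => rfl
  | cons y ys ih =>
    have hy := h y (List.mem_cons_self ..)
    simp [PySem.List.insertBy, hy, ih (fun z hz => h z (List.mem_cons_of_mem _ hz))]

-- inserting x between a prefix it never precedes and a suffix it always precedes
theorem insertBy_split {α : Type} (before : α → α → Bool) (x : α) (A V : List α)
    (hA : ∀ a ∈ A, before x a = false) (hV : ∀ v ∈ V, before x v = true) :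
    PySem.List.insertBy before x (A ++ V) = A ++ x :: V := by
  induction A with
  | nil =>
    cases V with
    | nil => rfl
    | cons v vs => simp [PySem.List.insertBy, hV v (List.mem_cons_self ..)]
  | cons a as ih =>
    have ha := hA a (List.mem_cons_self ..)
    simp [PySem.List.insertBy, ha, ih (fun z hz => hA z (List.mem_cons_of_mem _ hz))]

-- the stable insertion sort on a boolean key is the two-bucket partition
theorem sorted_bool_key {α : Type} (key : α → Bool) (xs A V : List α)
    (hA : ∀ a ∈ A, key a = false) (hV : ∀ v ∈ V, key v = true) :
    xs.foldl (fun acc x => PySem.List.insertBy (fun a b => decide (key a < key b)) x acc) (A ++ V)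
      = (A ++ xs.filter (fun x => !key x)) ++ (V ++ xs.filter key) := by
  induction xs generalizing A V with
  | nil => simp
  | cons x xs ih =>
    simp only [List.foldl_cons]
    by_cases hx : key x = true
    · rw [insertBy_all_false _ _ _ (by intro y _; simp [hx]),
        List.append_assoc,
        ih A (V ++ [x]) hA (by intro v hv
                               rcases List.mem_append.mp hv with h | h
                               · exact hV v h
                               · simp at h; simpa [h] using hx)]
      simp [hx]
    · have hx' : key x = false := by simpa using hx
      rw [insertBy_split _ _ A V
        (fun a ha => by simp [hx', hA a ha])
        (fun v hv => by simp [hx', hV v hv]),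
        show A ++ x :: V = (A ++ [x]) ++ V by simp,
        ih (A ++ [x]) V
          (by intro a ha
              rcases List.mem_append.mp ha with h | h
              · exact hA a h
              · simp at h; simpa [h] using hx') hV]
      simp [hx']

theorem inner_eq_sorted (sent : List (String × String)) :
    sentence_reordering_inner sent
      = PySem.List.sorted sent (fun tup => tup.2 == "VERB") false := by
  have hfold : ∀ (xs : List (String × String)) (r v : List (String × String)),
      (xs.foldl
        (fun (acc : List (String × String) × List (String × String)) tup =>
          if tup.2 == "VERB" then (acc.1, acc.2 ++ [tup]) else (acc.1 ++ [tup], acc.2))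
        (r, v))
      = (r ++ xs.filter (fun t => !(t.2 == "VERB")), v ++ xs.filter (fun t => t.2 == "VERB")) := by
    intro xs
    induction xs with
    | nil => simp
    | cons x xs ih =>
      intro r v
      by_cases hx : (x.2 == "VERB") = true
      · simp only [List.foldl_cons, hx, if_true, ih, List.filter_cons]
        simp
      · simp only [List.foldl_cons, hx, if_false, ih, List.filter_cons, Bool.false_eq_true]
        simp
  have := sorted_bool_key (fun t : String × String => t.2 == "VERB") sent [] []
    (by simp) (by simp)
  simp only [List.nil_append] at this
  simp only [sentence_reordering_inner, hfold, List.nil_append]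
  simpa [PySem.List.sorted] using this.symm

-- ===== VERDICT (by name: the statement is the Claim_ definition above) =====
theorem sentence_reordering_spec : Claim_equal_sentence_reordering := by
  intro ud_sents _
  unfold Spec_sentence_reordering sentence_reordering sentence_reordering_alt
  rw [PySem.List.foldl_append_singleton_eq_map]
  exact List.map_congr_left (fun sent _ => inner_eq_sorted sent)
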